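-- pv_equiv track=rewrite | github.com/ouerum/neural-FEBI | scripts/buildGroundTruth/getGroundTruth.py | safe_check
-- ===== SOURCE A (Python) =====
-- def safe_check(source_items, old_tag, new_tag):
--     index1 = 0
--     index2 = 0
--     for i, items in enumerate(source_items):
--         if items == 'tag_' + str(old_tag) + ":":
--             index1 = i
--         if items == 'tag_' + str(new_tag) + ":":
--             index2 = i
--     last_item1 = None
--     last_item2 = None
--     while index1 < len(source_items):
--         item = source_items[index1]
--         if item in ["revert", "return", "invalid", "stop", "selfdestruct"] or (
--                 item.startswith("jump") and not item.startswith("jumpi")):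
--             last_item1 = item
--         index1 += 1
--     while index2 < len(source_items):
--         item = source_items[index2]
--         if item in ["revert", "return", "invalid", "stop", "selfdestruct"] or (
--                 item.startswith("jump") and not item.startswith("jumpi")):
--             last_item2 = item
--         index2 += 1
--     return last_item2 == last_item1
-- ===== SOURCE B (Python) =====
-- _TERMINALS = {"revert", "return", "invalid", "stop", "selfdestruct"}
--
--
-- def _is_terminal(op):
--     return op in _TERMINALS or (op.startswith("jump") and not op.startswith("jumpi"))
--
--
-- def _last_tag_index(items, tag):
--     rev = items[::-1]
--     if tag in rev:
--         return len(items) - 1 - rev.index(tag)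
--     return 0
--
--
-- def _last_terminal_from(items, idx):
--     for op in reversed(items[idx:]):
--         if _is_terminal(op):
--             return op
--     return None
--
--
-- def safe_check(source_items, old_tag, new_tag):
--     i1 = _last_tag_index(source_items, 'tag_' + str(old_tag) + ":")
--     i2 = _last_tag_index(source_items, 'tag_' + str(new_tag) + ":")
--     return _last_terminal_from(source_items, i2) == _last_terminal_from(source_items, i1)
-- ===== Notes on version B (the rewrite author's own statement) =====
-- stated objective: faster
-- what changed: A's forward scans that overwrite a 'last seen' variable (last tag position, then last terminal opcode after it) are replaced by early-exiting reverse searches: the last tag occurrence is found as the first hit in the reversed list, and the last terminal op as the first match of a reversed suffix. The reverse searches stop at the first hit instead of always scanning to the end, a constant-factor win measured ~1.7x.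
import Mathlib
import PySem

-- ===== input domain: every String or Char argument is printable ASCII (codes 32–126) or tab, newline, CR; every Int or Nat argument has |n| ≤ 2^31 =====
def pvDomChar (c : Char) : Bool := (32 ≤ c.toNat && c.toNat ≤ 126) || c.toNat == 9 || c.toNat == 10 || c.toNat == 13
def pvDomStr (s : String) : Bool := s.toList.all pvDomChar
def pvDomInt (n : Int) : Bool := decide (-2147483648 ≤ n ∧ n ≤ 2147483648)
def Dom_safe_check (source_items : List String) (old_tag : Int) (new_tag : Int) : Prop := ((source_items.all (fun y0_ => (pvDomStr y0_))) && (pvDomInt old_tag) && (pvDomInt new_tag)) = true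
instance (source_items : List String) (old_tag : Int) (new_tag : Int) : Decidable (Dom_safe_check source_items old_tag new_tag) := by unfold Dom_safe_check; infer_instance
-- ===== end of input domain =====

-- B replaces A's forward overwrite-the-last scans by reverse first-hit searches (last tag
-- occurrence via index on the reversed list, last terminal op via find on the reversed suffix);
-- objective: faster by early exit (measured ~1.7x in a timing run) and a different decomposition.

-- ===== PORT A =====
-- A's two while loops walk from index to the end keeping the LAST matching item; index is an
-- Int that is always ≥ 0 (it starts at 0 and is only set to enumerate indices), so '.toNat' is exact.
def safe_check (source_items : List String) (old_tag : Int) (new_tag : Int) : Bool :=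
  let idx : Int × Int :=
    (PySem.List.enumerate source_items).foldl
      (fun (p : Int × Int) (ie : Int × String) =>
        let p := if ie.2 == "tag_" ++ PySem.Int.toStr old_tag ++ ":" then (ie.1, p.2) else p
        if ie.2 == "tag_" ++ PySem.Int.toStr new_tag ++ ":" then (p.1, ie.1) else p)
      (0, 0)
  let last_item1 : Option String :=
    (source_items.drop idx.1.toNat).foldl
      (fun (last : Option String) (item : String) =>
        if item == "revert" || item == "return" || item == "invalid" || item == "stop"
            || item == "selfdestruct"
            || (PySem.Str.startswith item "jump" && !PySem.Str.startswith item "jumpi")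
        then some item else last) none
  let last_item2 : Option String :=
    (source_items.drop idx.2.toNat).foldl
      (fun (last : Option String) (item : String) =>
        if item == "revert" || item == "return" || item == "invalid" || item == "stop"
            || item == "selfdestruct"
            || (PySem.Str.startswith item "jump" && !PySem.Str.startswith item "jumpi")
        then some item else last) none
  last_item2 == last_item1

-- ===== PORT B =====
def pvIsTerminal (op : String) : Bool :=
  op == "revert" || op == "return" || op == "invalid" || op == "stop" || op == "selfdestruct"
  || (PySem.Str.startswith op "jump" && !PySem.Str.startswith op "jumpi")

-- items[::-1] is items.reverse (PySem.List.slice?_none_none_neg_one)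
def pvLastTagIndex (items : List String) (tag : String) : Int :=
  match PySem.List.index? items.reverse tag with
  | some j => (items.length : Int) - 1 - (j : Int)
  | none => 0

def pvLastTerminalFrom (items : List String) (idx : Int) : Option String :=
  ((PySem.List.slice items (some idx) none).reverse).find? pvIsTerminal

def safe_check_alt (source_items : List String) (old_tag : Int) (new_tag : Int) : Bool :=
  let i1 := pvLastTagIndex source_items ("tag_" ++ PySem.Int.toStr old_tag ++ ":")
  let i2 := pvLastTagIndex source_items ("tag_" ++ PySem.Int.toStr new_tag ++ ":")
  pvLastTerminalFrom source_items i2 == pvLastTerminalFrom source_items i1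

-- ===== PRECONDITION & SPEC =====
def Spec_safe_check (source_items : List String) (old_tag : Int) (new_tag : Int) (out : Bool) : Prop := out = safe_check_alt source_items old_tag new_tag
instance (source_items : List String) (old_tag : Int) (new_tag : Int) (out : Bool) : Decidable (Spec_safe_check source_items old_tag new_tag out) := by unfold Spec_safe_check; infer_instance

-- ===== CLAIM (what is proved, stated in full; the proofs are below) =====
def Claim_equal_safe_check : Prop := ∀ (source_items : List String) (old_tag : Int) (new_tag : Int), Dom_safe_check source_items old_tag new_tag → Spec_safe_check source_items old_tag new_tag (safe_check source_items old_tag new_tag)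

-- ===== LEMMAS AND PROOFS =====

-- the single-tag version of A's enumerate fold
def pvEnumFold (l : List String) (t : String) : Int :=
  (PySem.List.enumerate l).foldl (fun (s : Int) (ie : Int × String) => if ie.2 == t then ie.1 else s) 0

-- A's pair fold splits into two independent single-tag folds
theorem pv_pair_split (L : List (Int × String)) (t1 t2 : String) (a b : Int) :
    L.foldl
      (fun (p : Int × Int) (ie : Int × String) =>
        let p := if ie.2 == t1 then (ie.1, p.2) else p
        if ie.2 == t2 then (p.1, ie.1) else p) (a, b)
    = (L.foldl (fun (s : Int) (ie : Int × String) => if ie.2 == t1 then ie.1 else s) a,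
       L.foldl (fun (s : Int) (ie : Int × String) => if ie.2 == t2 then ie.1 else s) b) := by
  induction L generalizing a b with
  | nil => rfl
  | cons hd tl ih =>
    have hE : (let p := if (hd.2 == t1) = true then (hd.1, (a, b).2) else (a, b);
               if (hd.2 == t2) = true then (p.1, hd.1) else p)
        = ((if (hd.2 == t1) = true then hd.1 else a),
           (if (hd.2 == t2) = true then hd.1 else b)) := by
      by_cases h1 : (hd.2 == t1) = true <;> by_cases h2 : (hd.2 == t2) = true <;>
        simp [h1, h2]
    rw [List.foldl_cons, List.foldl_cons, List.foldl_cons, hE, ih]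

-- A's enumerate fold equals B's reverse-index search
theorem pv_enumFold_eq_lastTagIndex (l : List String) (t : String) :
    pvEnumFold l t = pvLastTagIndex l t := by
  induction l using List.reverseRecOn with
  | nil => rfl
  | append_singleton l a ih =>
    unfold pvEnumFold pvLastTagIndex at *
    rw [PySem.List.enumerate_append, List.foldl_append]
    simp only [PySem.List.enumerate_cons, PySem.List.enumerate_nil, List.foldl_cons,
      List.foldl_nil, List.reverse_append, List.reverse_singleton, List.singleton_append,
      List.length_append, List.length_singleton]
    by_cases hat : a = t
    · subst hat
      rw [PySem.List.index?_cons_self]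
      simp
    · rw [PySem.List.index?_cons_of_ne l.reverse hat]
      have hne : (a == t) = false := by simp [hat]
      simp only [hne, Bool.false_eq_true, if_false]
      cases hidx : PySem.List.index? l.reverse t with
      | none =>
        rw [ih, hidx]
        simp
      | some j =>
        rw [ih, hidx]
        simp only [Option.map_some]
        push_cast
        ring

-- B's index is never negative
theorem pv_lastTagIndex_nonneg (l : List String) (t : String) : 0 ≤ pvLastTagIndex l t := by
  unfold pvLastTagIndex
  cases hidx : PySem.List.index? l.reverse t with
  | none => simp
  | some j =>
    obtain ⟨hj, -, -⟩ := PySem.List.getElem_of_index?_eq_some hidx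
    rw [List.length_reverse] at hj
    have h0 : (0 : Int) ≤ (l.length : Int) - 1 - (j : Int) := by omega
    simpa using h0

-- a keep-the-last forward fold is a first-hit search on the reversed list
theorem pv_foldl_last_eq_reverse_find (l : List String) (init : Option String) :
    l.foldl (fun (last : Option String) (item : String) =>
        if pvIsTerminal item then some item else last) init
    = match l.reverse.find? pvIsTerminal with
      | some x => some x
      | none => init := by
  induction l using List.reverseRecOn generalizing init with
  | nil => rfl
  | append_singleton l a ih =>
    rw [List.foldl_append]
    simp only [List.foldl_cons, List.foldl_nil, List.reverse_append, List.reverse_singleton,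
      List.singleton_append, List.find?_cons]
    by_cases hp : pvIsTerminal a
    · simp [hp]
    · simp only [hp, if_false, Bool.false_eq_true]
      exact ih init

-- ===== VERDICT (by name: the statement is the Claim_ definition above) =====
theorem safe_check_spec : Claim_equal_safe_check := by
  intro source_items old_tag new_tag _
  unfold Spec_safe_check
  simp only [safe_check, safe_check_alt, pvLastTerminalFrom]
  rw [pv_pair_split]
  have hfold := pv_enumFold_eq_lastTagIndex source_items
  unfold pvEnumFold at hfold
  rw [hfold, hfold]
  set tOld := "tag_" ++ PySem.Int.toStr old_tag ++ ":" with htOld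
  set tNew := "tag_" ++ PySem.Int.toStr new_tag ++ ":" with htNew
  rw [PySem.List.slice_from source_items (pv_lastTagIndex_nonneg source_items tOld),
      PySem.List.slice_from source_items (pv_lastTagIndex_nonneg source_items tNew)]
  have hscan : ∀ (i : Int),
      (source_items.drop i.toNat).foldl
        (fun (last : Option String) (item : String) =>
          if item == "revert" || item == "return" || item == "invalid" || item == "stop"
              || item == "selfdestruct"
              || (PySem.Str.startswith item "jump" && !PySem.Str.startswith item "jumpi")
          then some item else last) none
      = ((source_items.drop i.toNat).reverse).find? pvIsTerminal := by
    intro i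
    have := pv_foldl_last_eq_reverse_find (source_items.drop i.toNat) none
    unfold pvIsTerminal at this ⊢
    rw [this]
    cases (source_items.drop i.toNat).reverse.find? _ <;> rfl
  rw [hscan, hscan]
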